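-- pv_equiv track=rewrite | github.com/scruffynerf/scromfyUI-AceStep | nodes/lora_loader_node.py | _extract_module_path_from_lora_key
-- ===== SOURCE A (Python) =====
-- from typing import Dict, Tuple, Optional
--
-- def _extract_module_path_from_lora_key(full_key: str) -> Optional[str]:
--     marker = ".layers."
--     idx = full_key.find(marker)
--     if idx == -1:
--         return None
--     sub = full_key[idx + 1:]
--
--     for suffix in [".lora_A.weight", ".lora_B.weight", ".lora_A.default.weight", ".lora_B.default.weight"]:
--         if sub.endswith(suffix):
--             return sub[: -len(suffix)]
--
--     parts = sub.split(".")
--     if len(parts) >= 3 and parts[-3].startswith("lora_"):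
--         return ".".join(parts[:-3])
--     return None
-- ===== SOURCE B (Python) =====
-- from typing import Optional
--
-- def _extract_module_path_from_lora_key(full_key: str) -> Optional[str]:
--     marker = ".layers."
--     idx = full_key.find(marker)
--     if idx == -1:
--         return None
--     parts = full_key[idx + 1:].split(".")
--
--     if len(parts) >= 3 and parts[-1] == "weight" and parts[-2] in ("lora_A", "lora_B"):
--         return ".".join(parts[:-2])
--     if len(parts) >= 4 and parts[-1] == "weight" and parts[-2] == "default" and parts[-3] in ("lora_A", "lora_B"):
--         return ".".join(parts[:-3])
--     if len(parts) >= 3 and parts[-3].startswith("lora_"):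
--         return ".".join(parts[:-3])
--     return None
-- ===== Notes on version B (the rewrite author's own statement) =====
-- stated objective: alternative
-- what changed: B splits the tail after '.layers.' into dot-separated tokens once and decides every case by pattern-matching on the last two/three tokens of that list, replacing A's ordered endswith loop over four dotted suffix literals.
import Mathlib
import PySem

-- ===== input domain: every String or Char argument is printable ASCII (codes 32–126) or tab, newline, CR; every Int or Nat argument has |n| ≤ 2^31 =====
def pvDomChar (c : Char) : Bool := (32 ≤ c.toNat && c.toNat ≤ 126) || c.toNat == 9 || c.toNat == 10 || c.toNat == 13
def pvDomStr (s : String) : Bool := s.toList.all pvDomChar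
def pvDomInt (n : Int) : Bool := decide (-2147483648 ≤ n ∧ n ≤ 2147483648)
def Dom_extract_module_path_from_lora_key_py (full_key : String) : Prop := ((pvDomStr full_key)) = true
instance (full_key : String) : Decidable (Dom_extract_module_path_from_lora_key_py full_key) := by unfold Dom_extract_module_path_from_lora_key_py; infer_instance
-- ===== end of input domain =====

-- B replaces A's ordered endswith-loop over four dotted suffix literals by one split of the
-- tail into dot-separated tokens and pattern-matching on the last two/three tokens (objective:
-- alternative decomposition, same cost).

-- ===== PORT A =====
-- the 'for suffix in [...]' loop of A: first matching suffix wins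
def pvSuffixLoopA (sub : String) : List String → Option String
  | [] => none
  | sfx :: rest =>
    if PySem.Str.endswith sub sfx then
      some (PySem.Str.slice sub none (some (-(PySem.Str.len sfx))))
    else pvSuffixLoopA sub rest

-- A's body after 'sub' has been computed
def pvTailA (sub : String) : Option String :=
  match pvSuffixLoopA sub [".lora_A.weight", ".lora_B.weight", ".lora_A.default.weight", ".lora_B.default.weight"] with
  | some r => some r
  | none =>
    match PySem.Str.split? sub "." with          -- sep ≠ "": never none
    | none => none
    | some parts =>
      if 3 ≤ parts.length then
        match PySem.List.pyGet? parts (-3) with  -- in range: never none here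
        | some p =>
          if PySem.Str.startswith p "lora_" then
            some (PySem.Str.join "." (PySem.List.slice parts none (some (-3))))
          else none
        | none => none
      else none

def extract_module_path_from_lora_key_py (full_key : String) : Option String :=
  let idx := PySem.Str.find full_key ".layers."
  if idx = -1 then none
  else pvTailA (PySem.Str.slice full_key (some (idx + 1)) none)

-- ===== PORT B =====
-- B's body after 'parts' has been computed: decide everything from the token list
def pvTailB (sub : String) : Option String :=
  match PySem.Str.split? sub "." with            -- sep ≠ "": never none
  | none => none
  | some parts =>
    if 3 ≤ parts.length ∧ (PySem.List.pyGet? parts (-1)).getD "" = "weight" ∧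
        ((PySem.List.pyGet? parts (-2)).getD "" = "lora_A" ∨ (PySem.List.pyGet? parts (-2)).getD "" = "lora_B") then
      some (PySem.Str.join "." (PySem.List.slice parts none (some (-2))))
    else if 4 ≤ parts.length ∧ (PySem.List.pyGet? parts (-1)).getD "" = "weight" ∧
        (PySem.List.pyGet? parts (-2)).getD "" = "default" ∧
        ((PySem.List.pyGet? parts (-3)).getD "" = "lora_A" ∨ (PySem.List.pyGet? parts (-3)).getD "" = "lora_B") then
      some (PySem.Str.join "." (PySem.List.slice parts none (some (-3))))
    else if 3 ≤ parts.length ∧ PySem.Str.startswith ((PySem.List.pyGet? parts (-3)).getD "") "lora_" then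
      some (PySem.Str.join "." (PySem.List.slice parts none (some (-3))))
    else none

def extract_module_path_from_lora_key_py_alt (full_key : String) : Option String :=
  let idx := PySem.Str.find full_key ".layers."
  if idx = -1 then none
  else pvTailB (PySem.Str.slice full_key (some (idx + 1)) none)

-- ===== PRECONDITION & SPEC =====

def Spec_extract_module_path_from_lora_key_py (full_key : String) (out : Option String) : Prop := out = extract_module_path_from_lora_key_py_alt full_key
instance (full_key : String) (out : Option String) : Decidable (Spec_extract_module_path_from_lora_key_py full_key out) := by unfold Spec_extract_module_path_from_lora_key_py; infer_instance

-- ===== CLAIM (what is proved, stated in full; the proofs are below) =====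
def Claim_equal_extract_module_path_from_lora_key_py : Prop := ∀ (full_key : String), Dom_extract_module_path_from_lora_key_py full_key → Spec_extract_module_path_from_lora_key_py full_key (extract_module_path_from_lora_key_py full_key)

-- ===== LEMMAS AND PROOFS =====

theorem pv_splitOn_go_eq (fuel : Nat) (l cur : List Char) (acc : List (List Char)) (h : l.length ≤ fuel) :
    PySem.Chars.splitOn.go ['.'] fuel l cur acc
      = acc.reverse ++ List.modifyHead (cur.reverse ++ ·) (l.splitOn '.') := by
  induction fuel generalizing l cur acc with
  | zero =>
    interval_cases hl : l.length
    · rw [List.length_eq_zero_iff] at hl; subst hl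
      simp [PySem.Chars.splitOn.go, List.splitOn_nil]
  | succ n ih =>
    cases l with
    | nil => simp [PySem.Chars.splitOn.go, List.splitOn_nil]
    | cons c rest =>
      simp only [PySem.Chars.splitOn.go]
      by_cases hc : c = '.'
      · subst hc
        have hp : ['.'].isPrefixOf ('.' :: rest) = true := by simp [List.isPrefixOf]
        rw [if_pos hp]
        rw [ih _ _ _ (by simpa using h)]
        simp [List.splitOn, List.splitOnP_cons, List.modifyHead]
        cases hsp : List.splitOnP (fun x => x == '.') rest <;> simp
      · have hp : ['.'].isPrefixOf (c :: rest) = false := by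
          simp [List.isPrefixOf]; intro hh; exact absurd hh.symm hc
        rw [if_neg (by simp [hp])]
        rw [ih _ _ _ (by simpa using Nat.le_of_succ_le_succ (by simpa using h))]
        simp [List.splitOn, List.splitOnP_cons, hc]
        cases hsp : List.splitOnP (fun x => x == '.') rest <;> simp [List.modifyHead]

theorem pv_chars_splitOn_dot (cs : List Char) : PySem.Chars.splitOn cs ['.'] = cs.splitOn '.' := by
  rw [PySem.Chars.splitOn, pv_splitOn_go_eq _ _ _ _ (by omega)]
  simp
  cases h : cs.splitOn '.' with
  | nil => simp
  | cons a t => simp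

theorem pv_splitOn_append (xs ys : List Char) :
    (xs ++ '.' :: ys).splitOn '.' = xs.splitOn '.' ++ ys.splitOn '.' := by
  induction xs with
  | nil => simp [List.splitOn, List.splitOnP_cons, List.splitOnP_nil]
  | cons x xs ih =>
    simp only [List.cons_append, List.splitOn, List.splitOnP_cons] at *
    by_cases hx : x = '.'
    · simp [hx, ih]
    · simp only [beq_iff_eq, ih]
      simp [hx]
      rcases List.exists_cons_of_ne_nil (List.splitOnP_ne_nil (fun c => c == '.') xs) with ⟨a, t, hat⟩
      simp [hat]

theorem pv_intercalate_append (ps qs : List (List Char)) (hp : ps ≠ []) (hq : qs ≠ []) :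
    ['.'].intercalate (ps ++ qs) = ['.'].intercalate ps ++ '.' :: ['.'].intercalate qs := by
  induction ps with
  | nil => simp at hp
  | cons p ps ih =>
    cases ps with
    | nil =>
      rcases List.exists_cons_of_ne_nil hq with ⟨a, t, hat⟩
      simp [hat, List.intercalate]
    | cons p' ps' =>
      have h1 : ['.'].intercalate ((p :: p' :: ps') ++ qs) = p ++ '.' :: ['.'].intercalate ((p' :: ps') ++ qs) := by
        rcases List.exists_cons_of_ne_nil (l := (p' :: ps') ++ qs) (by simp) with ⟨a, t, hat⟩
        simp [hat, List.intercalate]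
      rw [h1, ih (by simp)]
      simp [List.intercalate]

theorem pv_splitOn_ne_nil (cs : List Char) : cs.splitOn '.' ≠ [] := by
  simp [List.splitOn]; exact List.splitOnP_ne_nil _ _

theorem pv_suffix_iff (cs : List Char) (ts : List (List Char)) (h1 : ts ≠ []) (h2 : ∀ t ∈ ts, '.' ∉ t) :
    ('.' :: ['.'].intercalate ts) <:+ cs ↔ ∃ ps, ps ≠ [] ∧ cs.splitOn '.' = ps ++ ts := by
  constructor
  · rintro ⟨X, rfl⟩
    refine ⟨X.splitOn '.', pv_splitOn_ne_nil X, ?_⟩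
    rw [pv_splitOn_append, List.splitOn_intercalate ts '.' h2 h1]
  · rintro ⟨ps, hps, hsplit⟩
    have hcs : cs = ['.'].intercalate ps ++ '.' :: ['.'].intercalate ts := by
      conv_lhs => rw [← List.intercalate_splitOn cs '.']
      rw [hsplit, pv_intercalate_append ps ts hps h1]
    exact ⟨['.'].intercalate ps, hcs.symm⟩

theorem pv_take_of_split (cs : List Char) (ps ts : List (List Char)) (hp : ps ≠ []) (hts : ts ≠ [])
    (h : cs.splitOn '.' = ps ++ ts) :
    cs.take (cs.length - (1 + (['.'].intercalate ts).length)) = ['.'].intercalate ps := by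
  have hcs : cs = ['.'].intercalate ps ++ '.' :: ['.'].intercalate ts := by
    conv_lhs => rw [← List.intercalate_splitOn cs '.']
    rw [h, pv_intercalate_append ps ts hp hts]
  rw [hcs]
  have hlen : (['.'].intercalate ps ++ '.' :: ['.'].intercalate ts).length
      - (1 + (['.'].intercalate ts).length) = (['.'].intercalate ps).length := by
    simp; omega
  rw [hlen, List.take_left]


theorem pv_pyGet?_neg {α : Type} (xs : List α) (k : Nat) (h1 : 0 < k) (h2 : k ≤ xs.length) :
    PySem.List.pyGet? xs (-(k:Int)) = xs[xs.length - k]? := by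
  simp only [PySem.List.pyGet?, PySem.List.pyIdx?]
  rw [if_neg (by omega), if_pos (by omega)]
  simp

theorem pv_back2 {α : Type} (l : List α) (a b : α) (h3 : 3 ≤ l.length)
    (hb : l[l.length-1]? = some b) (ha : l[l.length-2]? = some a) :
    ∃ ps, ps ≠ [] ∧ l = ps ++ [a, b] := by
  refine ⟨l.take (l.length-2), ?_, ?_⟩
  · have : (l.take (l.length-2)).length = l.length - 2 := by simp
    intro hnil; rw [hnil] at this; simp at this; omega
  · have hd : l.drop (l.length-2) = [a, b] := by
      apply List.ext_getElem?
      intro i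
      rw [List.getElem?_drop]
      match i with
      | 0 => simpa [Nat.sub_add_cancel] using ha
      | 1 => have : l.length - 2 + 1 = l.length - 1 := by omega
             rw [this]; simpa using hb
      | (n+2) =>
        rw [List.getElem?_eq_none (by omega), List.getElem?_eq_none (by simp)]
    conv_lhs => rw [← List.take_append_drop (l.length-2) l]
    rw [hd]

theorem pv_back3 {α : Type} (l : List α) (a b c : α) (h4 : 4 ≤ l.length)
    (hc : l[l.length-1]? = some c) (hb : l[l.length-2]? = some b) (ha : l[l.length-3]? = some a) :
    ∃ ps, ps ≠ [] ∧ l = ps ++ [a, b, c] := by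
  refine ⟨l.take (l.length-3), ?_, ?_⟩
  · have : (l.take (l.length-3)).length = l.length - 3 := by simp
    intro hnil; rw [hnil] at this; simp at this; omega
  · have hd : l.drop (l.length-3) = [a, b, c] := by
      apply List.ext_getElem?
      intro i
      rw [List.getElem?_drop]
      match i with
      | 0 => simpa [Nat.sub_add_cancel] using ha
      | 1 => have : l.length - 3 + 1 = l.length - 2 := by omega
             rw [this]; simpa using hb
      | 2 => have : l.length - 3 + 2 = l.length - 1 := by omega
             rw [this]; simpa using hc
      | (n+3) =>
        rw [List.getElem?_eq_none (by omega), List.getElem?_eq_none (by simp)]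
    conv_lhs => rw [← List.take_append_drop (l.length-3) l]
    rw [hd]

theorem pv_pyGet?_neg1 {α : Type} (xs : List α) (h : 1 ≤ xs.length) :
    PySem.List.pyGet? xs (-1) = xs[xs.length - 1]? := by
  have := pv_pyGet?_neg xs 1 (by omega) h; simpa using this
theorem pv_pyGet?_neg2 {α : Type} (xs : List α) (h : 2 ≤ xs.length) :
    PySem.List.pyGet? xs (-2) = xs[xs.length - 2]? := by
  have := pv_pyGet?_neg xs 2 (by omega) h
  rw [show ((-2:Int)) = -((2:ℕ):Int) by norm_num]; exact this
theorem pv_pyGet?_neg3 {α : Type} (xs : List α) (h : 3 ≤ xs.length) :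
    PySem.List.pyGet? xs (-3) = xs[xs.length - 3]? := by
  have := pv_pyGet?_neg xs 3 (by omega) h
  rw [show ((-3:Int)) = -((3:ℕ):Int) by norm_num]; exact this

-- tail getElem? facts for an append of a 2- or 3-element suffix
theorem pv_tail2_get {α : Type} (ps : List α) (a b : α) :
    (ps ++ [a,b])[(ps ++ [a,b]).length - 1]? = some b ∧ (ps ++ [a,b])[(ps ++ [a,b]).length - 2]? = some a := by
  constructor <;>
  · rw [List.getElem?_append_right (by simp)]
    simp
theorem pv_tail3_get {α : Type} (ps : List α) (a b c : α) :
    (ps ++ [a,b,c])[(ps ++ [a,b,c]).length - 1]? = some c ∧ (ps ++ [a,b,c])[(ps ++ [a,b,c]).length - 2]? = some b ∧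
      (ps ++ [a,b,c])[(ps ++ [a,b,c]).length - 3]? = some a := by
  refine ⟨?_, ?_, ?_⟩ <;>
  · rw [List.getElem?_append_right (by simp)]
    simp

theorem pv_map_toList (pc : List (List Char)) : (pc.map String.ofList).map String.toList = pc := by
  simp [List.map_map, Function.comp_def, String.toList_ofList]

theorem pv_cond1_elim (pc : List (List Char))
    (h3 : 3 ≤ (pc.map String.ofList).length)
    (hw : (PySem.List.pyGet? (pc.map String.ofList) (-1)).getD "" = "weight")
    (ha : (PySem.List.pyGet? (pc.map String.ofList) (-2)).getD "" = "lora_A" ∨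
          (PySem.List.pyGet? (pc.map String.ofList) (-2)).getD "" = "lora_B") :
    (∃ ps, ps ≠ [] ∧ pc = ps ++ ["lora_A".toList, "weight".toList]) ∨
    (∃ ps, ps ≠ [] ∧ pc = ps ++ ["lora_B".toList, "weight".toList]) := by
  set l := pc.map String.ofList with hl
  have h1 : l[l.length - 1]? = some (l[l.length - 1]'(by omega)) := List.getElem?_eq_getElem _
  have h2 : l[l.length - 2]? = some (l[l.length - 2]'(by omega)) := List.getElem?_eq_getElem _
  rw [pv_pyGet?_neg1 _ (by omega), h1] at hw
  rw [pv_pyGet?_neg2 _ (by omega), h2] at ha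
  simp only [Option.getD_some] at hw ha
  have hback := pv_back2 l _ _ h3 (hw ▸ h1) h2
  rcases hback with ⟨qs, hqs, hql⟩
  have hpc : pc = qs.map String.toList ++ [(l[l.length-2]'(by omega)).toList, "weight".toList] := by
    conv_lhs => rw [← pv_map_toList pc, ← hl, hql]
    simp
  rcases ha with ha | ha
  · left; exact ⟨qs.map String.toList, by simpa using hqs, by rw [hpc, ha]⟩
  · right; exact ⟨qs.map String.toList, by simpa using hqs, by rw [hpc, ha]⟩

theorem pv_cond2_elim (pc : List (List Char))
    (h4 : 4 ≤ (pc.map String.ofList).length)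
    (hw : (PySem.List.pyGet? (pc.map String.ofList) (-1)).getD "" = "weight")
    (hd : (PySem.List.pyGet? (pc.map String.ofList) (-2)).getD "" = "default")
    (ha : (PySem.List.pyGet? (pc.map String.ofList) (-3)).getD "" = "lora_A" ∨
          (PySem.List.pyGet? (pc.map String.ofList) (-3)).getD "" = "lora_B") :
    (∃ ps, ps ≠ [] ∧ pc = ps ++ ["lora_A".toList, "default".toList, "weight".toList]) ∨
    (∃ ps, ps ≠ [] ∧ pc = ps ++ ["lora_B".toList, "default".toList, "weight".toList]) := by
  set l := pc.map String.ofList with hl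
  have h1 : l[l.length - 1]? = some (l[l.length - 1]'(by omega)) := List.getElem?_eq_getElem _
  have h2 : l[l.length - 2]? = some (l[l.length - 2]'(by omega)) := List.getElem?_eq_getElem _
  have h3 : l[l.length - 3]? = some (l[l.length - 3]'(by omega)) := List.getElem?_eq_getElem _
  rw [pv_pyGet?_neg1 _ (by omega), h1] at hw
  rw [pv_pyGet?_neg2 _ (by omega), h2] at hd
  rw [pv_pyGet?_neg3 _ (by omega), h3] at ha
  simp only [Option.getD_some] at hw hd ha
  have hback := pv_back3 l _ _ _ h4 (hw ▸ h1) (hd ▸ h2) h3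
  rcases hback with ⟨qs, hqs, hql⟩
  have hpc : pc = qs.map String.toList ++ [(l[l.length-3]'(by omega)).toList, "default".toList, "weight".toList] := by
    conv_lhs => rw [← pv_map_toList pc, ← hl, hql]
    simp
  rcases ha with ha | ha
  · left; exact ⟨qs.map String.toList, by simpa using hqs, by rw [hpc, ha]⟩
  · right; exact ⟨qs.map String.toList, by simpa using hqs, by rw [hpc, ha]⟩

theorem pv_endswith_iff (sub : String) (sfx : String) (ts : List (List Char)) (h1 : ts ≠ [])
    (h2 : ∀ t ∈ ts, '.' ∉ t) (hsfx : sfx.toList = '.' :: ['.'].intercalate ts) :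
    (PySem.Str.endswith sub sfx = true) ↔ ∃ ps, ps ≠ [] ∧ sub.toList.splitOn '.' = ps ++ ts := by
  rw [PySem.Str.endswith, PySem.Chars.endswith_iff, hsfx]
  exact pv_suffix_iff _ ts h1 h2

theorem pv_a_val (sub : String) (ps ts : List (List Char)) (hp : ps ≠ []) (hts : ts ≠ [])
    (h : sub.toList.splitOn '.' = ps ++ ts) (L : Nat) (hL0 : 0 < L) (hL : L = 1 + (['.'].intercalate ts).length) :
    PySem.Str.slice sub none (some (-(L:Int))) = String.ofList (['.'].intercalate ps) := by
  rw [PySem.Str.slice]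
  congr 1
  have hs : PySem.Chars.slice sub.toList none (some (-(L:Int))) = sub.toList.take (sub.toList.length - L) := by
    rw [PySem.Chars.slice_eq_listSlice, PySem.List.slice_to_neg_natCast _ _ (by omega)]
  rw [hs, hL]
  exact pv_take_of_split _ ps ts hp hts h

theorem pv_b_val (ps ts : List (List Char)) (k : Nat) (hk : ts.length = k) :
    PySem.Str.join "." ((((ps ++ ts).map String.ofList)).take ((((ps ++ ts).map String.ofList)).length - k))
      = String.ofList (['.'].intercalate ps) := by
  have htake : (((ps ++ ts).map String.ofList)).take ((((ps ++ ts).map String.ofList)).length - k)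
      = ps.map String.ofList := by
    rw [List.map_append]
    have hlen : ((ps.map String.ofList) ++ (ts.map String.ofList)).length - k = (ps.map String.ofList).length := by
      simp [hk]
    rw [hlen, List.take_left]
  rw [htake, PySem.Str.join]
  congr 1
  rw [show (".".toList) = ['.'] from rfl, PySem.Chars.join]
  simp [List.map_map, Function.comp_def, String.toList_ofList]

theorem pv_condmap2 (ps : List (List Char)) (ta tb : List Char) (hps : ps ≠ []) :
    3 ≤ ((ps ++ [ta, tb]).map String.ofList).length ∧
    (PySem.List.pyGet? ((ps ++ [ta, tb]).map String.ofList) (-1)).getD "" = String.ofList tb ∧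
    (PySem.List.pyGet? ((ps ++ [ta, tb]).map String.ofList) (-2)).getD "" = String.ofList ta := by
  have hm : (ps ++ [ta, tb]).map String.ofList
      = ps.map String.ofList ++ [String.ofList ta, String.ofList tb] := by simp
  rw [hm]
  have hps' : 1 ≤ ps.length := by
    rcases List.exists_cons_of_ne_nil hps with ⟨x, t, rfl⟩; simp
  have hlen : (ps.map String.ofList ++ [String.ofList ta, String.ofList tb]).length = ps.length + 2 := by simp
  obtain ⟨g1, g2⟩ := pv_tail2_get (ps.map String.ofList) (String.ofList ta) (String.ofList tb)
  refine ⟨by omega, ?_, ?_⟩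
  · rw [pv_pyGet?_neg1 _ (by omega), g1]; rfl
  · rw [pv_pyGet?_neg2 _ (by omega), g2]; rfl

theorem pv_condmap3 (ps : List (List Char)) (ta tb tc : List Char) (hps : ps ≠ []) :
    4 ≤ ((ps ++ [ta, tb, tc]).map String.ofList).length ∧
    (PySem.List.pyGet? ((ps ++ [ta, tb, tc]).map String.ofList) (-1)).getD "" = String.ofList tc ∧
    (PySem.List.pyGet? ((ps ++ [ta, tb, tc]).map String.ofList) (-2)).getD "" = String.ofList tb ∧
    (PySem.List.pyGet? ((ps ++ [ta, tb, tc]).map String.ofList) (-3)).getD "" = String.ofList ta := by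
  have hm : (ps ++ [ta, tb, tc]).map String.ofList
      = ps.map String.ofList ++ [String.ofList ta, String.ofList tb, String.ofList tc] := by simp
  rw [hm]
  have hps' : 1 ≤ ps.length := by
    rcases List.exists_cons_of_ne_nil hps with ⟨x, t, rfl⟩; simp
  have hlen : (ps.map String.ofList ++ [String.ofList ta, String.ofList tb, String.ofList tc]).length = ps.length + 3 := by simp
  obtain ⟨g1, g2, g3⟩ := pv_tail3_get (ps.map String.ofList) (String.ofList ta) (String.ofList tb) (String.ofList tc)
  refine ⟨by omega, ?_, ?_, ?_⟩
  · rw [pv_pyGet?_neg1 _ (by omega), g1]; rfl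
  · rw [pv_pyGet?_neg2 _ (by omega), g2]; rfl
  · rw [pv_pyGet?_neg3 _ (by omega), g3]; rfl


theorem pv_tail_eq (sub : String) : pvTailA sub = pvTailB sub := by
  have hsplit : PySem.Str.split? sub "." = some ((sub.toList.splitOn '.').map String.ofList) := by
    rw [PySem.Str.split?,
        show PySem.Chars.split? sub.toList (".".toList) = some (PySem.Chars.splitOn sub.toList ['.']) from by
          simp [PySem.Chars.split?],
        pv_chars_splitOn_dot]
    rfl
  have e1 := pv_endswith_iff sub ".lora_A.weight" ["lora_A".toList, "weight".toList] (by simp) (by decide) (by decide)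
  have e2 := pv_endswith_iff sub ".lora_B.weight" ["lora_B".toList, "weight".toList] (by simp) (by decide) (by decide)
  have e3 := pv_endswith_iff sub ".lora_A.default.weight" ["lora_A".toList, "default".toList, "weight".toList] (by simp) (by decide) (by decide)
  have e4 := pv_endswith_iff sub ".lora_B.default.weight" ["lora_B".toList, "default".toList, "weight".toList] (by simp) (by decide) (by decide)
  by_cases c1 : ∃ ps, ps ≠ [] ∧ sub.toList.splitOn '.' = ps ++ ["lora_A".toList, "weight".toList]
  · rcases c1 with ⟨ps, hps, hpc⟩
    have he1 : PySem.Str.endswith sub ".lora_A.weight" = true := e1.mpr ⟨ps, hps, hpc⟩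
    obtain ⟨hc3, hcw, hca⟩ := pv_condmap2 ps "lora_A".toList "weight".toList hps
    simp only [pvTailA, pvSuffixLoopA, he1, if_true, pvTailB, hsplit, hpc]
    rw [if_pos ⟨hc3, hcw.trans String.ofList_toList, Or.inl (hca.trans String.ofList_toList)⟩]
    rw [show (-PySem.Str.len ".lora_A.weight") = -((14:Nat):Int) by decide]
    rw [pv_a_val sub ps _ hps (by simp) hpc 14 (by omega) (by decide)]
    rw [PySem.List.slice_to_neg_ofNat _ 2 (by norm_num)]
    rw [pv_b_val ps _ 2 (by decide)]
  · by_cases c2 : ∃ ps, ps ≠ [] ∧ sub.toList.splitOn '.' = ps ++ ["lora_B".toList, "weight".toList]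
    · rcases c2 with ⟨ps, hps, hpc⟩
      have he1 : PySem.Str.endswith sub ".lora_A.weight" = false :=
        Bool.eq_false_iff.mpr (fun h => c1 (e1.mp h))
      have he2 : PySem.Str.endswith sub ".lora_B.weight" = true := e2.mpr ⟨ps, hps, hpc⟩
      obtain ⟨hc3, hcw, hca⟩ := pv_condmap2 ps "lora_B".toList "weight".toList hps
      simp only [pvTailA, pvSuffixLoopA, he1, he2, Bool.false_eq_true, if_false, if_true, pvTailB, hsplit, hpc]
      rw [if_pos ⟨hc3, hcw.trans String.ofList_toList, Or.inr (hca.trans String.ofList_toList)⟩]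
      rw [show (-PySem.Str.len ".lora_B.weight") = -((14:Nat):Int) by decide]
      rw [pv_a_val sub ps _ hps (by simp) hpc 14 (by omega) (by decide)]
      rw [PySem.List.slice_to_neg_ofNat _ 2 (by norm_num)]
      rw [pv_b_val ps _ 2 (by decide)]
    · by_cases c3 : ∃ ps, ps ≠ [] ∧ sub.toList.splitOn '.' = ps ++ ["lora_A".toList, "default".toList, "weight".toList]
      · rcases c3 with ⟨ps, hps, hpc⟩
        have he1 : PySem.Str.endswith sub ".lora_A.weight" = false :=
          Bool.eq_false_iff.mpr (fun h => c1 (e1.mp h))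
        have he2 : PySem.Str.endswith sub ".lora_B.weight" = false :=
          Bool.eq_false_iff.mpr (fun h => c2 (e2.mp h))
        have he3 : PySem.Str.endswith sub ".lora_A.default.weight" = true := e3.mpr ⟨ps, hps, hpc⟩
        obtain ⟨hc4, hcw, hcd, hca⟩ := pv_condmap3 ps "lora_A".toList "default".toList "weight".toList hps
        have hnc1 : ¬(3 ≤ ((ps ++ ["lora_A".toList, "default".toList, "weight".toList]).map String.ofList).length ∧
            (PySem.List.pyGet? ((ps ++ ["lora_A".toList, "default".toList, "weight".toList]).map String.ofList) (-1)).getD "" = "weight" ∧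
            ((PySem.List.pyGet? ((ps ++ ["lora_A".toList, "default".toList, "weight".toList]).map String.ofList) (-2)).getD "" = "lora_A" ∨
             (PySem.List.pyGet? ((ps ++ ["lora_A".toList, "default".toList, "weight".toList]).map String.ofList) (-2)).getD "" = "lora_B")) := by
          rintro ⟨h3, hw, ha⟩
          rcases pv_cond1_elim _ h3 hw ha with ⟨qs, hqs, hql⟩ | ⟨qs, hqs, hql⟩
          · exact c1 ⟨qs, hqs, hpc.trans hql⟩
          · exact c2 ⟨qs, hqs, hpc.trans hql⟩
        simp only [pvTailA, pvSuffixLoopA, he1, he2, he3, Bool.false_eq_true, if_false, if_true, pvTailB, hsplit, hpc]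
        rw [if_neg hnc1]
        rw [if_pos ⟨hc4, hcw.trans String.ofList_toList, hcd.trans String.ofList_toList, Or.inl (hca.trans String.ofList_toList)⟩]
        rw [show (-PySem.Str.len ".lora_A.default.weight") = -((22:Nat):Int) by decide]
        rw [pv_a_val sub ps _ hps (by simp) hpc 22 (by omega) (by decide)]
        rw [PySem.List.slice_to_neg_ofNat _ 3 (by norm_num)]
        rw [pv_b_val ps _ 3 (by decide)]
      · by_cases c4 : ∃ ps, ps ≠ [] ∧ sub.toList.splitOn '.' = ps ++ ["lora_B".toList, "default".toList, "weight".toList]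
        · rcases c4 with ⟨ps, hps, hpc⟩
          have he1 : PySem.Str.endswith sub ".lora_A.weight" = false :=
            Bool.eq_false_iff.mpr (fun h => c1 (e1.mp h))
          have he2 : PySem.Str.endswith sub ".lora_B.weight" = false :=
            Bool.eq_false_iff.mpr (fun h => c2 (e2.mp h))
          have he3 : PySem.Str.endswith sub ".lora_A.default.weight" = false :=
            Bool.eq_false_iff.mpr (fun h => c3 (e3.mp h))
          have he4 : PySem.Str.endswith sub ".lora_B.default.weight" = true := e4.mpr ⟨ps, hps, hpc⟩
          obtain ⟨hc4, hcw, hcd, hca⟩ := pv_condmap3 ps "lora_B".toList "default".toList "weight".toList hps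
          have hnc1 : ¬(3 ≤ ((ps ++ ["lora_B".toList, "default".toList, "weight".toList]).map String.ofList).length ∧
              (PySem.List.pyGet? ((ps ++ ["lora_B".toList, "default".toList, "weight".toList]).map String.ofList) (-1)).getD "" = "weight" ∧
              ((PySem.List.pyGet? ((ps ++ ["lora_B".toList, "default".toList, "weight".toList]).map String.ofList) (-2)).getD "" = "lora_A" ∨
               (PySem.List.pyGet? ((ps ++ ["lora_B".toList, "default".toList, "weight".toList]).map String.ofList) (-2)).getD "" = "lora_B")) := by
            rintro ⟨h3, hw, ha⟩
            rcases pv_cond1_elim _ h3 hw ha with ⟨qs, hqs, hql⟩ | ⟨qs, hqs, hql⟩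
            · exact c1 ⟨qs, hqs, hpc.trans hql⟩
            · exact c2 ⟨qs, hqs, hpc.trans hql⟩
          simp only [pvTailA, pvSuffixLoopA, he1, he2, he3, he4, Bool.false_eq_true, if_false, if_true, pvTailB, hsplit, hpc]
          rw [if_neg hnc1]
          rw [if_pos ⟨hc4, hcw.trans String.ofList_toList, hcd.trans String.ofList_toList, Or.inr (hca.trans String.ofList_toList)⟩]
          rw [show (-PySem.Str.len ".lora_B.default.weight") = -((22:Nat):Int) by decide]
          rw [pv_a_val sub ps _ hps (by simp) hpc 22 (by omega) (by decide)]
          rw [PySem.List.slice_to_neg_ofNat _ 3 (by norm_num)]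
          rw [pv_b_val ps _ 3 (by decide)]
        · have he1 : PySem.Str.endswith sub ".lora_A.weight" = false :=
            Bool.eq_false_iff.mpr (fun h => c1 (e1.mp h))
          have he2 : PySem.Str.endswith sub ".lora_B.weight" = false :=
            Bool.eq_false_iff.mpr (fun h => c2 (e2.mp h))
          have he3 : PySem.Str.endswith sub ".lora_A.default.weight" = false :=
            Bool.eq_false_iff.mpr (fun h => c3 (e3.mp h))
          have he4 : PySem.Str.endswith sub ".lora_B.default.weight" = false :=
            Bool.eq_false_iff.mpr (fun h => c4 (e4.mp h))
          have hnc1 : ¬(3 ≤ ((sub.toList.splitOn '.').map String.ofList).length ∧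
              (PySem.List.pyGet? ((sub.toList.splitOn '.').map String.ofList) (-1)).getD "" = "weight" ∧
              ((PySem.List.pyGet? ((sub.toList.splitOn '.').map String.ofList) (-2)).getD "" = "lora_A" ∨
               (PySem.List.pyGet? ((sub.toList.splitOn '.').map String.ofList) (-2)).getD "" = "lora_B")) := by
            rintro ⟨h3, hw, ha⟩
            rcases pv_cond1_elim _ h3 hw ha with ⟨qs, hqs, hql⟩ | ⟨qs, hqs, hql⟩
            · exact c1 ⟨qs, hqs, hql⟩
            · exact c2 ⟨qs, hqs, hql⟩
          have hnc2 : ¬(4 ≤ ((sub.toList.splitOn '.').map String.ofList).length ∧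
              (PySem.List.pyGet? ((sub.toList.splitOn '.').map String.ofList) (-1)).getD "" = "weight" ∧
              (PySem.List.pyGet? ((sub.toList.splitOn '.').map String.ofList) (-2)).getD "" = "default" ∧
              ((PySem.List.pyGet? ((sub.toList.splitOn '.').map String.ofList) (-3)).getD "" = "lora_A" ∨
               (PySem.List.pyGet? ((sub.toList.splitOn '.').map String.ofList) (-3)).getD "" = "lora_B")) := by
            rintro ⟨h4, hw, hd, ha⟩
            rcases pv_cond2_elim _ h4 hw hd ha with ⟨qs, hqs, hql⟩ | ⟨qs, hqs, hql⟩
            · exact c3 ⟨qs, hqs, hql⟩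
            · exact c4 ⟨qs, hqs, hql⟩
          simp only [pvTailA, pvSuffixLoopA, he1, he2, he3, he4, Bool.false_eq_true, if_false, pvTailB, hsplit]
          rw [if_neg hnc1, if_neg hnc2]
          by_cases h3 : 3 ≤ ((sub.toList.splitOn '.').map String.ofList).length
          · obtain ⟨p, hp⟩ : ∃ p, PySem.List.pyGet? ((sub.toList.splitOn '.').map String.ofList) (-3) = some p :=
              ⟨_, by rw [pv_pyGet?_neg3 _ h3]; exact List.getElem?_eq_getElem (by omega)⟩
            rw [if_pos h3, hp]
            simp only [Option.getD_some]
            by_cases hs : PySem.Str.startswith p "lora_" = true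
            · rw [if_pos hs, if_pos ⟨h3, hs⟩]
            · rw [if_neg hs, if_neg (fun hh => hs hh.2)]
          · rw [if_neg h3, if_neg (fun hh => h3 hh.1)]


-- ===== VERDICT (by name: the statement is the Claim_ definition above) =====
theorem extract_module_path_from_lora_key_py_spec : Claim_equal_extract_module_path_from_lora_key_py := by
  intro full_key _
  unfold Spec_extract_module_path_from_lora_key_py extract_module_path_from_lora_key_py extract_module_path_from_lora_key_py_alt
  by_cases h : PySem.Str.find full_key ".layers." = -1 <;> simp [pv_tail_eq]
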